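-- pv_equiv track=rewrite | github.com/BRIDGE-Neuroscience/zarr-vectors-py | zarr_vectors/sharding/hilbert.py | hilbert_encode
-- ===== SOURCE A (Python) =====
-- def hilbert_encode(coords: tuple[int, ...], order: int = 16) -> int:
--     """Encode coordinates to a Hilbert curve index.
--
--     Args:
--         coords: Non-negative integer coordinates.
--         order: Number of bits per dimension (grid is ``2^order`` per axis).
--
--     Returns:
--         Hilbert curve index.
--     """
--     ndim = len(coords)
--     if ndim == 0:
--         return 0
--     if ndim == 1:
--         return coords[0]
--
--     # Shift negatives
--     shifted = [c + (1 << order) if c < 0 else c for c in coords]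
--
--     # Use the standard algorithm for 2D, generalize for ND
--     if ndim == 2:
--         return _hilbert_2d_encode(shifted[0], shifted[1], order)
--
--     # For 3D+: fall back to a simple interleave that gives
--     # reasonable locality (not true Hilbert but close)
--     return _hilbert_nd_encode(shifted, ndim, order)
--
-- def _hilbert_2d_encode(x: int, y: int, order: int) -> int:
--     """Standard 2D Hilbert curve encoding."""
--     rx, ry, d = 0, 0, 0
--     s = order - 1
--     while s >= 0:
--         n = 1 << s
--         rx = 1 if (x & n) > 0 else 0
--         ry = 1 if (y & n) > 0 else 0
--         d += n * n * ((3 * rx) ^ ry)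
--         # Rotate
--         if ry == 0:
--             if rx == 1:
--                 x = n - 1 - x
--                 y = n - 1 - y
--             x, y = y, x
--         s -= 1
--     return d
--
-- def _hilbert_nd_encode(coords: list[int], ndim: int, order: int) -> int:
--     """Approximate N-D Hilbert encoding using Gray code interleave."""
--     # Convert each coord to Gray code, then interleave bits
--     gray_coords = [c ^ (c >> 1) for c in coords]
--     code = 0
--     for bit in range(order):
--         for dim in range(ndim):
--             if gray_coords[dim] & (1 << bit):
--                 code |= 1 << (bit * ndim + dim)
--     return code
-- ===== SOURCE B (Python) =====
-- # Hilbert encode: 2D path rewritten as a table-driven state machine; ND path loops dim-major.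
--
-- # (state, quadrant) -> (hilbert digit, next state); state 0 is the canonical start.
-- _H2_TABLE = (
--     ((0, 1), (1, 0), (3, 3), (2, 0)),
--     ((0, 0), (3, 2), (1, 1), (2, 1)),
--     ((2, 2), (3, 1), (1, 2), (0, 3)),
--     ((2, 3), (1, 3), (3, 0), (0, 2)),
-- )
--
--
-- def _hilbert_2d_encode_sm(x: int, y: int, order: int) -> int:
--     d = 0
--     state = 0
--     lvl = order - 1
--     while lvl >= 0:
--         q = ((x >> lvl) & 1) * 2 + ((y >> lvl) & 1)
--         digit, state = _H2_TABLE[state][q]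
--         d = d * 4 + digit
--         lvl -= 1
--     return d
--
--
-- def hilbert_encode(coords: tuple[int, ...], order: int = 16) -> int:
--     ndim = len(coords)
--     if ndim == 0:
--         return 0
--     if ndim == 1:
--         return coords[0]
--     shifted = [c + (1 << order) if c < 0 else c for c in coords]
--     if ndim == 2:
--         return _hilbert_2d_encode_sm(shifted[0], shifted[1], order)
--     # ND Gray-code interleave, one dimension at a time
--     code = 0
--     for dim, c in enumerate(shifted):
--         g = c ^ (c >> 1)
--         for b in range(order):
--             if (g >> b) & 1:
--                 code |= 1 << (b * ndim + dim)
--     return code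
-- ===== Notes on version B (the rewrite author's own statement) =====
-- stated objective: alternative
-- what changed: The 2D path is rewritten as a table-driven state machine (a hardcoded (state, quadrant) -> (digit, next state) transition table walked from the most significant bit, accumulating d = d*4 + digit) instead of A's reflect-and-swap coordinate rotation, and the ND Gray-code interleave is accumulated dimension-major with plain addition of disjoint bit contributions instead of bit-major OR-ing.
-- outside the precondition, e.g. on hilbert_encode((-3, 5, -2), -1): A raises ValueError, B raises ValueError
import Mathlib
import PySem

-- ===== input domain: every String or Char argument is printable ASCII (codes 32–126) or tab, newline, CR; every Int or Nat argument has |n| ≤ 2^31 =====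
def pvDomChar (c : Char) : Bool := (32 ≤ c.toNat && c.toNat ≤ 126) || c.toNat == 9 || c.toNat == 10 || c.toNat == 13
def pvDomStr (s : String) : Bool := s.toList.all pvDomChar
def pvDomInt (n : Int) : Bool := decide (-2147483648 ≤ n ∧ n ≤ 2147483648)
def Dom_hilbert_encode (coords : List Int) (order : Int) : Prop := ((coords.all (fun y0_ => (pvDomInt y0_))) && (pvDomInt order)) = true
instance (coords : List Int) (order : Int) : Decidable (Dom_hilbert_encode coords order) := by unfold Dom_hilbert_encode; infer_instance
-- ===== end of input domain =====

-- B rewrites the 2D path as a table-driven state machine and the ND path as a dim-major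
-- arithmetic accumulation (objective: alternative, same asymptotic cost).

-- ===== PORT A =====
def pvH2Loop (x y d s : Int) : Int :=
  if _h : 0 ≤ s then
    let n : Int := 1 <<< s.toNat
    let rx : Int := if 0 < PySem.Int.band x n then 1 else 0
    let ry : Int := if 0 < PySem.Int.band y n then 1 else 0
    let d' := d + n * n * PySem.Int.bxor (3 * rx) ry
    let xy : Int × Int :=
      if ry = 0 then
        if rx = 1 then (n - 1 - y, n - 1 - x) else (y, x)
      else (x, y)
    pvH2Loop xy.1 xy.2 d' (s - 1)
  else d
termination_by (s + 1).toNat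
decreasing_by omega

def pvH2 (x y order : Int) : Int := pvH2Loop x y 0 (order - 1)

def pvHND (coords : List Int) (ndim order : Int) : Int :=
  let gray := coords.map (fun c => PySem.Int.bxor c (c >>> (1:Nat)))
  (PySem.List.pyRange 0 order).foldl (fun code bit =>
    (PySem.List.pyRange 0 ndim).foldl (fun code dim =>
      if PySem.Int.band (PySem.List.pyGetD gray dim 0) ((1:Int) <<< bit.toNat) ≠ 0
      then PySem.Int.bor code ((1:Int) <<< (bit * ndim + dim).toNat) else code) code) 0

def hilbert_encode (coords : List Int) (order : Int) : Int :=
  let ndim : Int := coords.length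
  if ndim = 0 then 0
  else if ndim = 1 then PySem.List.pyGetD coords 0 0
  else
    let shifted := coords.map (fun c => if c < 0 then c + ((1:Int) <<< order.toNat) else c)
    if ndim = 2 then pvH2 (PySem.List.pyGetD shifted 0 0) (PySem.List.pyGetD shifted 1 0) order
    else pvHND shifted ndim order

-- ===== PORT B =====
def pvH2Table : List (List (Int × Int)) :=
  [[(0,1),(1,0),(3,3),(2,0)],[(0,0),(3,2),(1,1),(2,1)],[(2,2),(3,1),(1,2),(0,3)],[(2,3),(1,3),(3,0),(0,2)]]

def pvH2SMLoop (x y d state lvl : Int) : Int :=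
  if _h : 0 ≤ lvl then
    let q := PySem.Int.band (x >>> lvl.toNat) 1 * 2 + PySem.Int.band (y >>> lvl.toNat) 1
    let ds := PySem.List.pyGetD (PySem.List.pyGetD pvH2Table state []) q (0, 0)
    pvH2SMLoop x y (d * 4 + ds.1) ds.2 (lvl - 1)
  else d
termination_by (lvl + 1).toNat
decreasing_by omega

def pvH2SM (x y order : Int) : Int := pvH2SMLoop x y 0 0 (order - 1)

def pvHNDAlt (shifted : List Int) (ndim order : Int) : Int :=
  (PySem.List.enumerate shifted).foldl (fun (code : Int) (dc : Int × Int) =>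
    let g : Int := PySem.Int.bxor dc.2 (dc.2 >>> (1:Nat))
    (PySem.List.pyRange 0 order).foldl (fun (code : Int) (b : Int) =>
      code + (PySem.Int.band (g >>> b.toNat) 1) <<< (b * ndim + dc.1).toNat) code) (0 : Int)

def hilbert_encode_alt (coords : List Int) (order : Int) : Int :=
  let ndim : Int := coords.length
  if ndim = 0 then 0
  else if ndim = 1 then PySem.List.pyGetD coords 0 0
  else
    let shifted := coords.map (fun c => if c < 0 then c + ((1:Int) <<< order.toNat) else c)
    if ndim = 2 then pvH2SM (PySem.List.pyGetD shifted 0 0) (PySem.List.pyGetD shifted 1 0) order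
    else pvHNDAlt shifted ndim order

-- ===== PRECONDITION & SPEC =====
-- Pre_ excludes exactly the inputs where Python A raises: with ≥ 2 coordinates, a negative
-- coordinate and a negative order, `1 << order` raises ValueError (B raises there too).
def Pre_hilbert_encode (coords : List Int) (order : Int) : Prop :=
  coords.length ≤ 1 ∨ 0 ≤ order ∨ ∀ c ∈ coords, 0 ≤ c
instance (coords : List Int) (order : Int) : Decidable (Pre_hilbert_encode coords order) := by
  unfold Pre_hilbert_encode; infer_instance

def pvWitness_hilbert_encode : List Int × Int := ([3, 5], 4)

def Spec_hilbert_encode (coords : List Int) (order : Int) (out : Int) : Prop := out = hilbert_encode_alt coords order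
instance (coords : List Int) (order : Int) (out : Int) : Decidable (Spec_hilbert_encode coords order out) := by unfold Spec_hilbert_encode; infer_instance

-- ===== CLAIM (what is proved, stated in full; the proofs are below) =====
def Claim_equal_hilbert_encode : Prop := ∀ (coords : List Int) (order : Int), Dom_hilbert_encode coords order → Pre_hilbert_encode coords order → Spec_hilbert_encode coords order (hilbert_encode coords order)

-- ===== LEMMAS AND PROOFS =====

-- bit k of x, as Python computes it ((x >> k) & 1), for arbitrary integers
def pvBit (x : Int) (k : Nat) : Int := x / 2 ^ k % 2

lemma pvBit01 (x : Int) (k : Nat) : pvBit x k = 0 ∨ pvBit x k = 1 := by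
  unfold pvBit; omega

lemma pvBit_of_mod (x : Int) (k : Nat) : pvBit x k = (x % 2 ^ (k + 1)) / 2 ^ k % 2 := by
  unfold pvBit
  have h1 : x = 2 ^ (k + 1) * (x / 2 ^ (k + 1)) + x % 2 ^ (k + 1) :=
    (Int.mul_ediv_add_emod x (2 ^ (k + 1))).symm
  conv_lhs => rw [h1]
  rw [show (2:Int) ^ (k + 1) * (x / 2 ^ (k + 1)) + x % 2 ^ (k + 1)
        = x % 2 ^ (k + 1) + 2 * (x / 2 ^ (k + 1)) * 2 ^ k by ring,
      Int.add_mul_ediv_right _ _ (by positivity : (2:Int) ^ k ≠ 0),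
      show x % 2 ^ (k + 1) / 2 ^ k + 2 * (x / 2 ^ (k + 1))
        = x % 2 ^ (k + 1) / 2 ^ k + x / 2 ^ (k + 1) * 2 by ring]
  omega

lemma pvBit_congr {x y : Int} {k : Nat} (h : x % 2 ^ (k + 1) = y % 2 ^ (k + 1)) :
    pvBit x k = pvBit y k := by
  rw [pvBit_of_mod, pvBit_of_mod, h]

lemma pvBit_neg (v : Int) (k : Nat) : pvBit (-1 - v) k = 1 - pvBit v k := by
  unfold pvBit
  have hp : (0:Int) < 2 ^ k := by positivity
  set q := v / 2 ^ k with hq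
  set r := v % 2 ^ k with hr
  have hv : v = 2 ^ k * q + r := (Int.mul_ediv_add_emod v (2 ^ k)).symm
  have hr0 : 0 ≤ r := Int.emod_nonneg v (by omega)
  have hr1 : r < 2 ^ k := Int.emod_lt_of_pos v hp
  have hd : -1 - v = (2 ^ k - 1 - r) + (-q - 1) * 2 ^ k := by rw [hv]; ring
  have hsmall : (2 ^ k - 1 - r) / 2 ^ k = 0 := Int.ediv_eq_zero_of_lt (by omega) (by omega)
  rw [hd, Int.add_mul_ediv_right _ _ (by omega : (2:Int) ^ k ≠ 0), hsmall, zero_add]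
  omega

lemma pvBit_natCast (m : Nat) (k : Nat) : pvBit (m : Int) k = ((m / 2 ^ k % 2 : Nat) : Int) := by
  unfold pvBit; push_cast; rfl

lemma pv_toNat_two_pow (k : Nat) : ((2:Int) ^ k).toNat = 2 ^ k := by
  rw [show ((2:Int) ^ k) = ((2 ^ k : Nat) : Int) by push_cast; ring]
  exact Int.toNat_natCast _

lemma pv_band_pow (x : Int) (k : Nat) :
    PySem.Int.band x (2 ^ k) = pvBit x k * 2 ^ k := by
  by_cases hx : 0 ≤ x
  · rw [PySem.Int.band_of_nonneg hx (by positivity), pv_toNat_two_pow, Nat.and_two_pow,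
        Nat.testBit_eq_decide_div_mod_eq]
    have hb := pvBit_natCast x.toNat k
    rw [Int.toNat_of_nonneg hx] at hb
    by_cases h : x.toNat / 2 ^ k % 2 = 1
    · simp [h, hb]
    · have h0 : x.toNat / 2 ^ k % 2 = 0 := by omega
      simp [h, hb, h0]
  · unfold PySem.Int.band
    rw [if_neg hx, if_pos (by positivity : (0:Int) ≤ 2 ^ k), pv_toNat_two_pow]
    have hm : x = -1 - ((-x - 1).toNat : Int) := by omega
    set m := (-x - 1).toNat with hmdef
    rw [Nat.land_comm, Nat.and_two_pow, Nat.testBit_eq_decide_div_mod_eq]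
    have hbit : pvBit x k = 1 - pvBit (m : Int) k := by rw [hm]; exact pvBit_neg _ _
    have hb := pvBit_natCast m k
    by_cases h : m / 2 ^ k % 2 = 1
    · simp [h, hbit, hb]
    · have h0 : m / 2 ^ k % 2 = 0 := by omega
      simp [h, hbit, hb, h0]

lemma pv_band_sr_one (x : Int) (k : Nat) :
    PySem.Int.band (x >>> k) 1 = pvBit x k := by
  rw [PySem.Int.band_one, PySem.Int.mod_eq_emod_of_pos (by omega : (0:Int) < 2),
      Int.shiftRight_eq_div_pow]
  unfold pvBit
  norm_num

lemma pv_band_pow_ne (x : Int) (k : Nat) :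
    (PySem.Int.band x (2 ^ k) ≠ 0) ↔ pvBit x k = 1 := by
  rw [pv_band_pow]
  rcases pvBit01 x k with h | h <;> simp [h]

lemma pv_if_bit1 (k : Nat) : (if 0 < (1:Int) * 2 ^ k then (1:Int) else 0) = 1 := by
  rw [if_pos]; positivity

lemma pv_if_bit0 (k : Nat) : (if 0 < (0:Int) * 2 ^ k then (1:Int) else 0) = 0 := by
  rw [if_neg]; simp

-- the quadrant transformation B's state st ∈ [0,4) encodes: bit 0 = swap x/y, bit 1 = complement
def pvSel (st v w : Int) : Int :=
  let base := if st % 2 = 1 then w else v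
  if 2 ≤ st then -1 - base else base

lemma pv_mod_step {a b : Int} {k : Nat} (h : a % 2 ^ (k + 1) = b % 2 ^ (k + 1)) :
    a % 2 ^ k = b % 2 ^ k := by
  have hd : (2:Int) ^ k ∣ 2 ^ (k + 1) := by exact pow_dvd_pow 2 (by omega)
  calc a % 2 ^ k = a % 2 ^ (k + 1) % 2 ^ k := (Int.emod_emod_of_dvd a hd).symm
    _ = b % 2 ^ (k + 1) % 2 ^ k := by rw [h]
    _ = b % 2 ^ k := Int.emod_emod_of_dvd b hd

lemma pv_mod_compl {a b : Int} {k : Nat} (h : a % 2 ^ k = b % 2 ^ k) :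
    (2 ^ k - 1 - a) % 2 ^ k = (-1 - b) % 2 ^ k := by
  conv_lhs => rw [show (2:Int) ^ k - 1 - a = -1 - a + 1 * 2 ^ k by ring]
  rw [Int.add_mul_emod_self_right, Int.sub_emod (-1) a, h, ← Int.sub_emod]

lemma pv_smshift (k : Nat) : ∀ (X Y d st : Int),
    pvH2SMLoop X Y d st ((k:Int) - 1) = d * 4 ^ k + pvH2SMLoop X Y 0 st ((k:Int) - 1) := by
  induction k with
  | zero =>
    intro X Y d st
    rw [pvH2SMLoop, pvH2SMLoop]
    norm_num
    rw [pvH2SMLoop]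
    norm_num
  | succ k ih =>
    intro X Y d st
    rw [show ((k+1:Nat):Int) - 1 = (k:Int) by push_cast; ring]
    conv_lhs => rw [pvH2SMLoop]
    conv_rhs => rw [pvH2SMLoop]
    rw [dif_pos (Int.natCast_nonneg k), dif_pos (Int.natCast_nonneg k)]
    simp only []
    rw [ih, ih X Y (0 * 4 + _)]
    ring

lemma pv_h2main : ∀ (k : Nat) (st X Y x y d : Int), 0 ≤ st → st < 4 →
    x % 2 ^ k = pvSel st X Y % 2 ^ k → y % 2 ^ k = pvSel st Y X % 2 ^ k →
    pvH2Loop x y d ((k:Int) - 1) = d + pvH2SMLoop X Y 0 st ((k:Int) - 1) := by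
  intro k
  induction k with
  | zero =>
    intro st X Y x y d _ _ _ _
    rw [pvH2Loop, pvH2SMLoop]
    norm_num
  | succ k ih =>
    intro st X Y x y d h0 h4 hx hy
    rw [show ((k+1:Nat):Int) - 1 = (k:Int) by push_cast; ring]
    conv_lhs => rw [pvH2Loop]
    conv_rhs => rw [pvH2SMLoop]
    rw [dif_pos (Int.natCast_nonneg k), dif_pos (Int.natCast_nonneg k)]
    simp only [Int.toNat_natCast, show ((1 <<< k : Nat) : Int) = 2 ^ k from by rw [Nat.shiftLeft_eq]; push_cast; ring]
    rw [pv_band_sr_one X k, pv_band_sr_one Y k]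
    have hxk : pvBit x k = pvBit (pvSel st X Y) k := pvBit_congr hx
    have hyk : pvBit y k = pvBit (pvSel st Y X) k := pvBit_congr hy
    have hx' : x % 2 ^ k = pvSel st X Y % 2 ^ k := pv_mod_step hx
    have hy' : y % 2 ^ k = pvSel st Y X % 2 ^ k := pv_mod_step hy
    interval_cases st
    · -- st = 0
      rcases pvBit01 X k with hbX | hbX <;> rcases pvBit01 Y k with hbY | hbY
      · -- bX=0 bY=0
        have hbx : pvBit x k = 0 := by
          have h := pvBit_congr hx
          simp only [pvSel] at h
          norm_num at h
          omega
        have hby : pvBit y k = 0 := by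
          have h := pvBit_congr hy
          simp only [pvSel] at h
          norm_num at h
          omega
        have hsrcx : x % 2 ^ k = (X) % 2 ^ k := by
          have h := pv_mod_step hx; simp only [pvSel] at h; norm_num at h; exact h
        have hsrcy : y % 2 ^ k = (Y) % 2 ^ k := by
          have h := pv_mod_step hy; simp only [pvSel] at h; norm_num at h; exact h
        have hX2 : y % 2 ^ k = (Y) % 2 ^ k := hsrcy
        have hY2 : x % 2 ^ k = (X) % 2 ^ k := hsrcx
        rw [pv_band_pow x k, pv_band_pow y k, hbx, hby, hbX, hbY]
        rw [pv_if_bit0 k]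
        norm_num
        try simp only [show PySem.Int.bxor 0 0 = (0:Int) from by decide]
        rw [show PySem.List.pyGetD (PySem.List.pyGetD pvH2Table 0 []) 0 (0, 0) = ((0:Int), (1:Int)) from by decide]
        norm_num
        rw [ih 1 X Y y x d (by norm_num) (by norm_num) hX2 hY2]
        try ring
      · -- bX=0 bY=1
        have hbx : pvBit x k = 0 := by
          have h := pvBit_congr hx
          simp only [pvSel] at h
          norm_num at h
          omega
        have hby : pvBit y k = 1 := by
          have h := pvBit_congr hy
          simp only [pvSel] at h
          norm_num at h
          omega
        have hsrcx : x % 2 ^ k = (X) % 2 ^ k := by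
          have h := pv_mod_step hx; simp only [pvSel] at h; norm_num at h; exact h
        have hsrcy : y % 2 ^ k = (Y) % 2 ^ k := by
          have h := pv_mod_step hy; simp only [pvSel] at h; norm_num at h; exact h
        have hX2 : x % 2 ^ k = (X) % 2 ^ k := hsrcx
        have hY2 : y % 2 ^ k = (Y) % 2 ^ k := hsrcy
        rw [pv_band_pow x k, pv_band_pow y k, hbx, hby, hbX, hbY]
        rw [pv_if_bit1 k, pv_if_bit0 k]
        norm_num
        try simp only [show PySem.Int.bxor 0 1 = (1:Int) from by decide]
        rw [show PySem.List.pyGetD (PySem.List.pyGetD pvH2Table 0 []) 1 (0, 0) = ((1:Int), (0:Int)) from by decide]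
        norm_num
        rw [ih 0 X Y x y (d + 2 ^ k * 2 ^ k) (by norm_num) (by norm_num) hX2 hY2, pv_smshift k X Y 1 0]
        rw [show (4:Int) ^ k = 2 ^ k * 2 ^ k from by rw [← mul_pow]; norm_num]
        ring
      · -- bX=1 bY=0
        have hbx : pvBit x k = 1 := by
          have h := pvBit_congr hx
          simp only [pvSel] at h
          norm_num at h
          omega
        have hby : pvBit y k = 0 := by
          have h := pvBit_congr hy
          simp only [pvSel] at h
          norm_num at h
          omega
        have hsrcx : x % 2 ^ k = (X) % 2 ^ k := by
          have h := pv_mod_step hx; simp only [pvSel] at h; norm_num at h; exact h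
        have hsrcy : y % 2 ^ k = (Y) % 2 ^ k := by
          have h := pv_mod_step hy; simp only [pvSel] at h; norm_num at h; exact h
        have hX2 : (2 ^ k - 1 - y) % 2 ^ k = (-1 - Y) % 2 ^ k := by
          have h2 := pv_mod_compl hsrcy
          try rw [show (-1 - (Y) : Int) = (-1 - Y) by ring] at h2
          exact h2
        have hY2 : (2 ^ k - 1 - x) % 2 ^ k = (-1 - X) % 2 ^ k := by
          have h2 := pv_mod_compl hsrcx
          try rw [show (-1 - (X) : Int) = (-1 - X) by ring] at h2
          exact h2
        rw [pv_band_pow x k, pv_band_pow y k, hbx, hby, hbX, hbY]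
        rw [pv_if_bit1 k, pv_if_bit0 k]
        norm_num
        try simp only [show PySem.Int.bxor 3 0 = (3:Int) from by decide]
        rw [show PySem.List.pyGetD (PySem.List.pyGetD pvH2Table 0 []) 2 (0, 0) = ((3:Int), (3:Int)) from by decide]
        norm_num
        rw [ih 3 X Y (2 ^ k - 1 - y) (2 ^ k - 1 - x) (d + 2 ^ k * 2 ^ k * 3) (by norm_num) (by norm_num) hX2 hY2, pv_smshift k X Y 3 3]
        rw [show (4:Int) ^ k = 2 ^ k * 2 ^ k from by rw [← mul_pow]; norm_num]
        ring
      · -- bX=1 bY=1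
        have hbx : pvBit x k = 1 := by
          have h := pvBit_congr hx
          simp only [pvSel] at h
          norm_num at h
          omega
        have hby : pvBit y k = 1 := by
          have h := pvBit_congr hy
          simp only [pvSel] at h
          norm_num at h
          omega
        have hsrcx : x % 2 ^ k = (X) % 2 ^ k := by
          have h := pv_mod_step hx; simp only [pvSel] at h; norm_num at h; exact h
        have hsrcy : y % 2 ^ k = (Y) % 2 ^ k := by
          have h := pv_mod_step hy; simp only [pvSel] at h; norm_num at h; exact h
        have hX2 : x % 2 ^ k = (X) % 2 ^ k := hsrcx
        have hY2 : y % 2 ^ k = (Y) % 2 ^ k := hsrcy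
        rw [pv_band_pow x k, pv_band_pow y k, hbx, hby, hbX, hbY]
        rw [pv_if_bit1 k]
        norm_num
        try simp only [show PySem.Int.bxor 3 1 = (2:Int) from by decide]
        rw [show PySem.List.pyGetD (PySem.List.pyGetD pvH2Table 0 []) 3 (0, 0) = ((2:Int), (0:Int)) from by decide]
        norm_num
        rw [ih 0 X Y x y (d + 2 ^ k * 2 ^ k * 2) (by norm_num) (by norm_num) hX2 hY2, pv_smshift k X Y 2 0]
        rw [show (4:Int) ^ k = 2 ^ k * 2 ^ k from by rw [← mul_pow]; norm_num]
        ring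
    · -- st = 1
      rcases pvBit01 X k with hbX | hbX <;> rcases pvBit01 Y k with hbY | hbY
      · -- bX=0 bY=0
        have hbx : pvBit x k = 0 := by
          have h := pvBit_congr hx
          simp only [pvSel] at h
          norm_num at h
          omega
        have hby : pvBit y k = 0 := by
          have h := pvBit_congr hy
          simp only [pvSel] at h
          norm_num at h
          omega
        have hsrcx : x % 2 ^ k = (Y) % 2 ^ k := by
          have h := pv_mod_step hx; simp only [pvSel] at h; norm_num at h; exact h
        have hsrcy : y % 2 ^ k = (X) % 2 ^ k := by
          have h := pv_mod_step hy; simp only [pvSel] at h; norm_num at h; exact h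
        have hX2 : y % 2 ^ k = (X) % 2 ^ k := hsrcy
        have hY2 : x % 2 ^ k = (Y) % 2 ^ k := hsrcx
        rw [pv_band_pow x k, pv_band_pow y k, hbx, hby, hbX, hbY]
        rw [pv_if_bit0 k]
        norm_num
        try simp only [show PySem.Int.bxor 0 0 = (0:Int) from by decide]
        rw [show PySem.List.pyGetD (PySem.List.pyGetD pvH2Table 1 []) 0 (0, 0) = ((0:Int), (0:Int)) from by decide]
        norm_num
        rw [ih 0 X Y y x d (by norm_num) (by norm_num) hX2 hY2]
        try ring
      · -- bX=0 bY=1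
        have hbx : pvBit x k = 1 := by
          have h := pvBit_congr hx
          simp only [pvSel] at h
          norm_num at h
          omega
        have hby : pvBit y k = 0 := by
          have h := pvBit_congr hy
          simp only [pvSel] at h
          norm_num at h
          omega
        have hsrcx : x % 2 ^ k = (Y) % 2 ^ k := by
          have h := pv_mod_step hx; simp only [pvSel] at h; norm_num at h; exact h
        have hsrcy : y % 2 ^ k = (X) % 2 ^ k := by
          have h := pv_mod_step hy; simp only [pvSel] at h; norm_num at h; exact h
        have hX2 : (2 ^ k - 1 - y) % 2 ^ k = (-1 - X) % 2 ^ k := by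
          have h2 := pv_mod_compl hsrcy
          try rw [show (-1 - (X) : Int) = (-1 - X) by ring] at h2
          exact h2
        have hY2 : (2 ^ k - 1 - x) % 2 ^ k = (-1 - Y) % 2 ^ k := by
          have h2 := pv_mod_compl hsrcx
          try rw [show (-1 - (Y) : Int) = (-1 - Y) by ring] at h2
          exact h2
        rw [pv_band_pow x k, pv_band_pow y k, hbx, hby, hbX, hbY]
        rw [pv_if_bit1 k, pv_if_bit0 k]
        norm_num
        try simp only [show PySem.Int.bxor 3 0 = (3:Int) from by decide]
        rw [show PySem.List.pyGetD (PySem.List.pyGetD pvH2Table 1 []) 1 (0, 0) = ((3:Int), (2:Int)) from by decide]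
        norm_num
        rw [ih 2 X Y (2 ^ k - 1 - y) (2 ^ k - 1 - x) (d + 2 ^ k * 2 ^ k * 3) (by norm_num) (by norm_num) hX2 hY2, pv_smshift k X Y 3 2]
        rw [show (4:Int) ^ k = 2 ^ k * 2 ^ k from by rw [← mul_pow]; norm_num]
        ring
      · -- bX=1 bY=0
        have hbx : pvBit x k = 0 := by
          have h := pvBit_congr hx
          simp only [pvSel] at h
          norm_num at h
          omega
        have hby : pvBit y k = 1 := by
          have h := pvBit_congr hy
          simp only [pvSel] at h
          norm_num at h
          omega
        have hsrcx : x % 2 ^ k = (Y) % 2 ^ k := by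
          have h := pv_mod_step hx; simp only [pvSel] at h; norm_num at h; exact h
        have hsrcy : y % 2 ^ k = (X) % 2 ^ k := by
          have h := pv_mod_step hy; simp only [pvSel] at h; norm_num at h; exact h
        have hX2 : x % 2 ^ k = (Y) % 2 ^ k := hsrcx
        have hY2 : y % 2 ^ k = (X) % 2 ^ k := hsrcy
        rw [pv_band_pow x k, pv_band_pow y k, hbx, hby, hbX, hbY]
        rw [pv_if_bit1 k, pv_if_bit0 k]
        norm_num
        try simp only [show PySem.Int.bxor 0 1 = (1:Int) from by decide]
        rw [show PySem.List.pyGetD (PySem.List.pyGetD pvH2Table 1 []) 2 (0, 0) = ((1:Int), (1:Int)) from by decide]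
        norm_num
        rw [ih 1 X Y x y (d + 2 ^ k * 2 ^ k) (by norm_num) (by norm_num) hX2 hY2, pv_smshift k X Y 1 1]
        rw [show (4:Int) ^ k = 2 ^ k * 2 ^ k from by rw [← mul_pow]; norm_num]
        ring
      · -- bX=1 bY=1
        have hbx : pvBit x k = 1 := by
          have h := pvBit_congr hx
          simp only [pvSel] at h
          norm_num at h
          omega
        have hby : pvBit y k = 1 := by
          have h := pvBit_congr hy
          simp only [pvSel] at h
          norm_num at h
          omega
        have hsrcx : x % 2 ^ k = (Y) % 2 ^ k := by
          have h := pv_mod_step hx; simp only [pvSel] at h; norm_num at h; exact h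
        have hsrcy : y % 2 ^ k = (X) % 2 ^ k := by
          have h := pv_mod_step hy; simp only [pvSel] at h; norm_num at h; exact h
        have hX2 : x % 2 ^ k = (Y) % 2 ^ k := hsrcx
        have hY2 : y % 2 ^ k = (X) % 2 ^ k := hsrcy
        rw [pv_band_pow x k, pv_band_pow y k, hbx, hby, hbX, hbY]
        rw [pv_if_bit1 k]
        norm_num
        try simp only [show PySem.Int.bxor 3 1 = (2:Int) from by decide]
        rw [show PySem.List.pyGetD (PySem.List.pyGetD pvH2Table 1 []) 3 (0, 0) = ((2:Int), (1:Int)) from by decide]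
        norm_num
        rw [ih 1 X Y x y (d + 2 ^ k * 2 ^ k * 2) (by norm_num) (by norm_num) hX2 hY2, pv_smshift k X Y 2 1]
        rw [show (4:Int) ^ k = 2 ^ k * 2 ^ k from by rw [← mul_pow]; norm_num]
        ring
    · -- st = 2
      rcases pvBit01 X k with hbX | hbX <;> rcases pvBit01 Y k with hbY | hbY
      · -- bX=0 bY=0
        have hbx : pvBit x k = 1 := by
          have h := pvBit_congr hx
          simp only [pvSel] at h
          norm_num at h
          rw [pvBit_neg] at h
          omega
        have hby : pvBit y k = 1 := by
          have h := pvBit_congr hy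
          simp only [pvSel] at h
          norm_num at h
          rw [pvBit_neg] at h
          omega
        have hsrcx : x % 2 ^ k = (-1 - X) % 2 ^ k := by
          have h := pv_mod_step hx; simp only [pvSel] at h; norm_num at h; exact h
        have hsrcy : y % 2 ^ k = (-1 - Y) % 2 ^ k := by
          have h := pv_mod_step hy; simp only [pvSel] at h; norm_num at h; exact h
        have hX2 : x % 2 ^ k = (-1 - X) % 2 ^ k := hsrcx
        have hY2 : y % 2 ^ k = (-1 - Y) % 2 ^ k := hsrcy
        rw [pv_band_pow x k, pv_band_pow y k, hbx, hby, hbX, hbY]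
        rw [pv_if_bit1 k]
        norm_num
        try simp only [show PySem.Int.bxor 3 1 = (2:Int) from by decide]
        rw [show PySem.List.pyGetD (PySem.List.pyGetD pvH2Table 2 []) 0 (0, 0) = ((2:Int), (2:Int)) from by decide]
        norm_num
        rw [ih 2 X Y x y (d + 2 ^ k * 2 ^ k * 2) (by norm_num) (by norm_num) hX2 hY2, pv_smshift k X Y 2 2]
        rw [show (4:Int) ^ k = 2 ^ k * 2 ^ k from by rw [← mul_pow]; norm_num]
        ring
      · -- bX=0 bY=1
        have hbx : pvBit x k = 1 := by
          have h := pvBit_congr hx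
          simp only [pvSel] at h
          norm_num at h
          rw [pvBit_neg] at h
          omega
        have hby : pvBit y k = 0 := by
          have h := pvBit_congr hy
          simp only [pvSel] at h
          norm_num at h
          rw [pvBit_neg] at h
          omega
        have hsrcx : x % 2 ^ k = (-1 - X) % 2 ^ k := by
          have h := pv_mod_step hx; simp only [pvSel] at h; norm_num at h; exact h
        have hsrcy : y % 2 ^ k = (-1 - Y) % 2 ^ k := by
          have h := pv_mod_step hy; simp only [pvSel] at h; norm_num at h; exact h
        have hX2 : (2 ^ k - 1 - y) % 2 ^ k = (Y) % 2 ^ k := by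
          have h2 := pv_mod_compl hsrcy
          try rw [show (-1 - (-1 - Y) : Int) = (Y) by ring] at h2
          exact h2
        have hY2 : (2 ^ k - 1 - x) % 2 ^ k = (X) % 2 ^ k := by
          have h2 := pv_mod_compl hsrcx
          try rw [show (-1 - (-1 - X) : Int) = (X) by ring] at h2
          exact h2
        rw [pv_band_pow x k, pv_band_pow y k, hbx, hby, hbX, hbY]
        rw [pv_if_bit1 k, pv_if_bit0 k]
        norm_num
        try simp only [show PySem.Int.bxor 3 0 = (3:Int) from by decide]
        rw [show PySem.List.pyGetD (PySem.List.pyGetD pvH2Table 2 []) 1 (0, 0) = ((3:Int), (1:Int)) from by decide]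
        norm_num
        rw [ih 1 X Y (2 ^ k - 1 - y) (2 ^ k - 1 - x) (d + 2 ^ k * 2 ^ k * 3) (by norm_num) (by norm_num) hX2 hY2, pv_smshift k X Y 3 1]
        rw [show (4:Int) ^ k = 2 ^ k * 2 ^ k from by rw [← mul_pow]; norm_num]
        ring
      · -- bX=1 bY=0
        have hbx : pvBit x k = 0 := by
          have h := pvBit_congr hx
          simp only [pvSel] at h
          norm_num at h
          rw [pvBit_neg] at h
          omega
        have hby : pvBit y k = 1 := by
          have h := pvBit_congr hy
          simp only [pvSel] at h
          norm_num at h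
          rw [pvBit_neg] at h
          omega
        have hsrcx : x % 2 ^ k = (-1 - X) % 2 ^ k := by
          have h := pv_mod_step hx; simp only [pvSel] at h; norm_num at h; exact h
        have hsrcy : y % 2 ^ k = (-1 - Y) % 2 ^ k := by
          have h := pv_mod_step hy; simp only [pvSel] at h; norm_num at h; exact h
        have hX2 : x % 2 ^ k = (-1 - X) % 2 ^ k := hsrcx
        have hY2 : y % 2 ^ k = (-1 - Y) % 2 ^ k := hsrcy
        rw [pv_band_pow x k, pv_band_pow y k, hbx, hby, hbX, hbY]
        rw [pv_if_bit1 k, pv_if_bit0 k]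
        norm_num
        try simp only [show PySem.Int.bxor 0 1 = (1:Int) from by decide]
        rw [show PySem.List.pyGetD (PySem.List.pyGetD pvH2Table 2 []) 2 (0, 0) = ((1:Int), (2:Int)) from by decide]
        norm_num
        rw [ih 2 X Y x y (d + 2 ^ k * 2 ^ k) (by norm_num) (by norm_num) hX2 hY2, pv_smshift k X Y 1 2]
        rw [show (4:Int) ^ k = 2 ^ k * 2 ^ k from by rw [← mul_pow]; norm_num]
        ring
      · -- bX=1 bY=1
        have hbx : pvBit x k = 0 := by
          have h := pvBit_congr hx
          simp only [pvSel] at h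
          norm_num at h
          rw [pvBit_neg] at h
          omega
        have hby : pvBit y k = 0 := by
          have h := pvBit_congr hy
          simp only [pvSel] at h
          norm_num at h
          rw [pvBit_neg] at h
          omega
        have hsrcx : x % 2 ^ k = (-1 - X) % 2 ^ k := by
          have h := pv_mod_step hx; simp only [pvSel] at h; norm_num at h; exact h
        have hsrcy : y % 2 ^ k = (-1 - Y) % 2 ^ k := by
          have h := pv_mod_step hy; simp only [pvSel] at h; norm_num at h; exact h
        have hX2 : y % 2 ^ k = (-1 - Y) % 2 ^ k := hsrcy
        have hY2 : x % 2 ^ k = (-1 - X) % 2 ^ k := hsrcx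
        rw [pv_band_pow x k, pv_band_pow y k, hbx, hby, hbX, hbY]
        rw [pv_if_bit0 k]
        norm_num
        try simp only [show PySem.Int.bxor 0 0 = (0:Int) from by decide]
        rw [show PySem.List.pyGetD (PySem.List.pyGetD pvH2Table 2 []) 3 (0, 0) = ((0:Int), (3:Int)) from by decide]
        norm_num
        rw [ih 3 X Y y x d (by norm_num) (by norm_num) hX2 hY2]
        try ring
    · -- st = 3
      rcases pvBit01 X k with hbX | hbX <;> rcases pvBit01 Y k with hbY | hbY
      · -- bX=0 bY=0
        have hbx : pvBit x k = 1 := by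
          have h := pvBit_congr hx
          simp only [pvSel] at h
          norm_num at h
          rw [pvBit_neg] at h
          omega
        have hby : pvBit y k = 1 := by
          have h := pvBit_congr hy
          simp only [pvSel] at h
          norm_num at h
          rw [pvBit_neg] at h
          omega
        have hsrcx : x % 2 ^ k = (-1 - Y) % 2 ^ k := by
          have h := pv_mod_step hx; simp only [pvSel] at h; norm_num at h; exact h
        have hsrcy : y % 2 ^ k = (-1 - X) % 2 ^ k := by
          have h := pv_mod_step hy; simp only [pvSel] at h; norm_num at h; exact h
        have hX2 : x % 2 ^ k = (-1 - Y) % 2 ^ k := hsrcx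
        have hY2 : y % 2 ^ k = (-1 - X) % 2 ^ k := hsrcy
        rw [pv_band_pow x k, pv_band_pow y k, hbx, hby, hbX, hbY]
        rw [pv_if_bit1 k]
        norm_num
        try simp only [show PySem.Int.bxor 3 1 = (2:Int) from by decide]
        rw [show PySem.List.pyGetD (PySem.List.pyGetD pvH2Table 3 []) 0 (0, 0) = ((2:Int), (3:Int)) from by decide]
        norm_num
        rw [ih 3 X Y x y (d + 2 ^ k * 2 ^ k * 2) (by norm_num) (by norm_num) hX2 hY2, pv_smshift k X Y 2 3]
        rw [show (4:Int) ^ k = 2 ^ k * 2 ^ k from by rw [← mul_pow]; norm_num]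
        ring
      · -- bX=0 bY=1
        have hbx : pvBit x k = 0 := by
          have h := pvBit_congr hx
          simp only [pvSel] at h
          norm_num at h
          rw [pvBit_neg] at h
          omega
        have hby : pvBit y k = 1 := by
          have h := pvBit_congr hy
          simp only [pvSel] at h
          norm_num at h
          rw [pvBit_neg] at h
          omega
        have hsrcx : x % 2 ^ k = (-1 - Y) % 2 ^ k := by
          have h := pv_mod_step hx; simp only [pvSel] at h; norm_num at h; exact h
        have hsrcy : y % 2 ^ k = (-1 - X) % 2 ^ k := by
          have h := pv_mod_step hy; simp only [pvSel] at h; norm_num at h; exact h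
        have hX2 : x % 2 ^ k = (-1 - Y) % 2 ^ k := hsrcx
        have hY2 : y % 2 ^ k = (-1 - X) % 2 ^ k := hsrcy
        rw [pv_band_pow x k, pv_band_pow y k, hbx, hby, hbX, hbY]
        rw [pv_if_bit1 k, pv_if_bit0 k]
        norm_num
        try simp only [show PySem.Int.bxor 0 1 = (1:Int) from by decide]
        rw [show PySem.List.pyGetD (PySem.List.pyGetD pvH2Table 3 []) 1 (0, 0) = ((1:Int), (3:Int)) from by decide]
        norm_num
        rw [ih 3 X Y x y (d + 2 ^ k * 2 ^ k) (by norm_num) (by norm_num) hX2 hY2, pv_smshift k X Y 1 3]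
        rw [show (4:Int) ^ k = 2 ^ k * 2 ^ k from by rw [← mul_pow]; norm_num]
        ring
      · -- bX=1 bY=0
        have hbx : pvBit x k = 1 := by
          have h := pvBit_congr hx
          simp only [pvSel] at h
          norm_num at h
          rw [pvBit_neg] at h
          omega
        have hby : pvBit y k = 0 := by
          have h := pvBit_congr hy
          simp only [pvSel] at h
          norm_num at h
          rw [pvBit_neg] at h
          omega
        have hsrcx : x % 2 ^ k = (-1 - Y) % 2 ^ k := by
          have h := pv_mod_step hx; simp only [pvSel] at h; norm_num at h; exact h
        have hsrcy : y % 2 ^ k = (-1 - X) % 2 ^ k := by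
          have h := pv_mod_step hy; simp only [pvSel] at h; norm_num at h; exact h
        have hX2 : (2 ^ k - 1 - y) % 2 ^ k = (X) % 2 ^ k := by
          have h2 := pv_mod_compl hsrcy
          try rw [show (-1 - (-1 - X) : Int) = (X) by ring] at h2
          exact h2
        have hY2 : (2 ^ k - 1 - x) % 2 ^ k = (Y) % 2 ^ k := by
          have h2 := pv_mod_compl hsrcx
          try rw [show (-1 - (-1 - Y) : Int) = (Y) by ring] at h2
          exact h2
        rw [pv_band_pow x k, pv_band_pow y k, hbx, hby, hbX, hbY]
        rw [pv_if_bit1 k, pv_if_bit0 k]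
        norm_num
        try simp only [show PySem.Int.bxor 3 0 = (3:Int) from by decide]
        rw [show PySem.List.pyGetD (PySem.List.pyGetD pvH2Table 3 []) 2 (0, 0) = ((3:Int), (0:Int)) from by decide]
        norm_num
        rw [ih 0 X Y (2 ^ k - 1 - y) (2 ^ k - 1 - x) (d + 2 ^ k * 2 ^ k * 3) (by norm_num) (by norm_num) hX2 hY2, pv_smshift k X Y 3 0]
        rw [show (4:Int) ^ k = 2 ^ k * 2 ^ k from by rw [← mul_pow]; norm_num]
        ring
      · -- bX=1 bY=1
        have hbx : pvBit x k = 0 := by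
          have h := pvBit_congr hx
          simp only [pvSel] at h
          norm_num at h
          rw [pvBit_neg] at h
          omega
        have hby : pvBit y k = 0 := by
          have h := pvBit_congr hy
          simp only [pvSel] at h
          norm_num at h
          rw [pvBit_neg] at h
          omega
        have hsrcx : x % 2 ^ k = (-1 - Y) % 2 ^ k := by
          have h := pv_mod_step hx; simp only [pvSel] at h; norm_num at h; exact h
        have hsrcy : y % 2 ^ k = (-1 - X) % 2 ^ k := by
          have h := pv_mod_step hy; simp only [pvSel] at h; norm_num at h; exact h
        have hX2 : y % 2 ^ k = (-1 - X) % 2 ^ k := hsrcy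
        have hY2 : x % 2 ^ k = (-1 - Y) % 2 ^ k := hsrcx
        rw [pv_band_pow x k, pv_band_pow y k, hbx, hby, hbX, hbY]
        rw [pv_if_bit0 k]
        norm_num
        try simp only [show PySem.Int.bxor 0 0 = (0:Int) from by decide]
        rw [show PySem.List.pyGetD (PySem.List.pyGetD pvH2Table 3 []) 3 (0, 0) = ((0:Int), (2:Int)) from by decide]
        norm_num
        rw [ih 2 X Y y x d (by norm_num) (by norm_num) hX2 hY2]
        try ring

lemma pv_h2_eq (x y order : Int) : pvH2 x y order = pvH2SM x y order := by
  unfold pvH2 pvH2SM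
  by_cases h : order ≤ 0
  · rw [pvH2Loop, pvH2SMLoop, dif_neg (by omega), dif_neg (by omega)]
  · have hk : ((order.toNat : Nat) : Int) = order := Int.toNat_of_nonneg (by omega)
    have hmain := pv_h2main order.toNat 0 x y x y 0 (by norm_num) (by norm_num)
      (by norm_num [pvSel]) (by norm_num [pvSel])
    rw [hk] at hmain
    simpa using hmain

lemma pv_nat_lor_pow {m p : Nat} (h : m < 2 ^ p) : m ||| 2 ^ p = m + 2 ^ p := by
  apply Nat.eq_of_testBit_eq
  intro i
  rw [Nat.testBit_lor]
  rcases Nat.lt_trichotomy i p with h1 | rfl | h1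
  · rw [Nat.add_comm m, Nat.testBit_two_pow_add_gt h1, Nat.testBit_two_pow]
    simp [show ¬ (p = i) by omega]
  · rw [Nat.add_comm m, Nat.testBit_two_pow_add_eq, Nat.testBit_lt_two_pow h, Nat.testBit_two_pow]
    simp
  · have hpi : (2:Nat) ^ (p + 1) ≤ 2 ^ i := Nat.pow_le_pow_right (by omega) (by omega)
    have hlt : m + 2 ^ p < 2 ^ i := by
      have : (2:Nat) ^ (p + 1) = 2 ^ p + 2 ^ p := by ring
      omega
    rw [Nat.testBit_lt_two_pow hlt, Nat.testBit_lt_two_pow (by omega : m < 2 ^ i),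
        Nat.testBit_two_pow]
    simp [show ¬ (p = i) by omega]

lemma pv_or_pow {code : Int} {p : Nat} (h0 : 0 ≤ code) (h : code < 2 ^ p) :
    PySem.Int.bor code (2 ^ p) = code + 2 ^ p := by
  rw [PySem.Int.bor_of_nonneg h0 (by positivity), pv_toNat_two_pow]
  have hc : (code.toNat : Int) = code := Int.toNat_of_nonneg h0
  have hm : code.toNat < 2 ^ p := by
    have h2 : ((2 ^ p : Nat) : Int) = (2:Int) ^ p := by push_cast; ring
    omega
  rw [pv_nat_lor_pow hm]
  push_cast
  omega

-- nonnegativity/upper bound of the partial term sums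
lemma pv_sum_bounds (g : Nat → Int) (L B : Nat) (m : Nat) :
    0 ≤ ∑ j ∈ Finset.range m, (if pvBit (g j) B = 1 then (2:Int) ^ (B * L + j) else 0) ∧
    ∑ j ∈ Finset.range m, (if pvBit (g j) B = 1 then (2:Int) ^ (B * L + j) else 0)
      ≤ 2 ^ (B * L + m) - 2 ^ (B * L) := by
  induction m with
  | zero => simp
  | succ m ih =>
    rw [Finset.sum_range_succ]
    have hterm0 : (0:Int) ≤ (if pvBit (g m) B = 1 then (2:Int) ^ (B * L + m) else 0) := by
      split <;> positivity
    have hterm1 : (if pvBit (g m) B = 1 then (2:Int) ^ (B * L + m) else 0) ≤ 2 ^ (B * L + m) := by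
      split
      · exact le_refl _
      · positivity
    have hp : (2:Int) ^ (B * L + (m + 1)) = 2 ^ (B * L + m) + 2 ^ (B * L + m) := by ring
    constructor
    · linarith [ih.1]
    · linarith [ih.2]

lemma pv_inner_fold (g : Nat → Int) (L B : Nat) (m : Nat) : ∀ (code : Int),
    0 ≤ code → code < 2 ^ (B * L) →
    List.foldl (fun code j => if pvBit (g j) B = 1
        then PySem.Int.bor code (2 ^ (B * L + j)) else code) code (List.range m)
      = code + ∑ j ∈ Finset.range m, (if pvBit (g j) B = 1 then (2:Int) ^ (B * L + j) else 0) := by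
  induction m with
  | zero => intro code h0 h1; simp
  | succ m ih =>
    intro code h0 h1
    rw [List.range_succ, List.foldl_append, ih code h0 h1, List.foldl_cons, List.foldl_nil,
        Finset.sum_range_succ]
    have hb := pv_sum_bounds g L B m
    rcases pvBit01 (g m) B with hb0 | hb1
    · simp [hb0]
    · rw [if_pos hb1, if_pos hb1,
          pv_or_pow (by linarith [hb.1]) (by linarith [hb.2, (pow_le_pow_right₀ (by norm_num : (1:Int) ≤ 2) (by omega : B * L ≤ B * L + m))])]
      ring

lemma pv_outer_fold (g : Nat → Int) (L : Nat) (K : Nat) :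
    List.foldl (fun code B => List.foldl (fun code j => if pvBit (g j) B = 1
        then PySem.Int.bor code (2 ^ (B * L + j)) else code) code (List.range L)) 0 (List.range K)
      = ∑ B ∈ Finset.range K, ∑ j ∈ Finset.range L,
          (if pvBit (g j) B = 1 then (2:Int) ^ (B * L + j) else 0) ∧
    0 ≤ (∑ B ∈ Finset.range K, ∑ j ∈ Finset.range L,
          (if pvBit (g j) B = 1 then (2:Int) ^ (B * L + j) else 0)) ∧
    (∑ B ∈ Finset.range K, ∑ j ∈ Finset.range L,
          (if pvBit (g j) B = 1 then (2:Int) ^ (B * L + j) else 0)) ≤ 2 ^ (K * L) - 1 := by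
  induction K with
  | zero => simp
  | succ K ih =>
    obtain ⟨heq, h0, h1⟩ := ih
    have hlt : (∑ B ∈ Finset.range K, ∑ j ∈ Finset.range L,
        (if pvBit (g j) B = 1 then (2:Int) ^ (B * L + j) else 0)) < 2 ^ (K * L) := by linarith
    have hinner := pv_inner_fold g L K L _ h0 hlt
    have hbnd := pv_sum_bounds g L K L
    have hexp : (2:Int) ^ (K * L + L) = 2 ^ ((K + 1) * L) := by ring_nf
    refine ⟨?_, ?_, ?_⟩
    · rw [List.range_succ, List.foldl_append, heq, List.foldl_cons, List.foldl_nil,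
          Finset.sum_range_succ, hinner]
    · rw [Finset.sum_range_succ]; linarith [hbnd.1]
    · rw [Finset.sum_range_succ]
      have h2 : (2:Int) ^ (K * L) ≤ 2 ^ ((K + 1) * L) :=
        pow_le_pow_right₀ (by norm_num) (mul_le_mul_right' (by omega : K ≤ K + 1) L)
      linarith [hbnd.2, hexp.ge, hexp.le]

lemma pv_toNat_pos (B L j : Nat) : (((B:Int)) * ((L:Int)) + ((j:Int))).toNat = B * L + j := by
  rw [show ((B:Int)) * ((L:Int)) + ((j:Int)) = ((B * L + j : Nat) : Int) by push_cast; ring,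
      Int.toNat_natCast]

lemma pv_one_shl (n : Nat) : ((1:Int) <<< n) = 2 ^ n := by rw [Int.shiftLeft_eq, one_mul]

lemma pv_one_shl' (n : Nat) : ((1:Int) <<< ((n:Int))) = 2 ^ n := by
  rw [Int.one_shiftLeft]; push_cast; ring

lemma pv_list_sum (n : Nat) (f : Nat → Int) :
    ((List.range n).map f).sum = ∑ i ∈ Finset.range n, f i := by
  induction n with
  | zero => simp
  | succ n ih => rw [List.range_succ, List.map_append, List.sum_append, Finset.sum_range_succ, ih]; simp

lemma pv_getD_gray (sh : List Int) (i : Int) :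
    PySem.List.pyGetD (sh.map (fun c => PySem.Int.bxor c (c >>> (1:Nat)))) i 0
      = (fun c => PySem.Int.bxor c (c >>> (1:Nat))) (PySem.List.pyGetD sh i 0) := by
  have h := PySem.List.pyGetD_map (fun c => PySem.Int.bxor c (c >>> (1:Nat))) sh i 0
  simpa using h

lemma pv_nd_A (sh : List Int) (K : Nat) :
    pvHND sh (sh.length : Int) ((K:Nat) : Int)
      = ∑ B ∈ Finset.range K, ∑ j ∈ Finset.range sh.length,
          (if pvBit (PySem.Int.bxor (PySem.List.pyGetD sh (j:Int) 0)
              ((PySem.List.pyGetD sh (j:Int) 0) >>> (1:Nat))) B = 1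
           then (2:Int) ^ (B * sh.length + j) else 0) := by
  unfold pvHND
  simp only [PySem.List.pyRange_zero_natCast, List.foldl_map, pv_getD_gray, Int.toNat_natCast,
             pv_toNat_pos, pv_one_shl, pv_one_shl', pv_band_pow_ne]
  exact (pv_outer_fold (fun j => PySem.Int.bxor (PySem.List.pyGetD sh (j:Int) 0)
    ((PySem.List.pyGetD sh (j:Int) 0) >>> (1:Nat))) sh.length K).1

lemma pv_nd_B (sh : List Int) (K : Nat) :
    pvHNDAlt sh (sh.length : Int) ((K:Nat) : Int)
      = ∑ j ∈ Finset.range sh.length, ∑ B ∈ Finset.range K,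
          pvBit (PySem.Int.bxor (PySem.List.pyGetD sh (j:Int) 0)
              ((PySem.List.pyGetD sh (j:Int) 0) >>> (1:Nat))) B * (2:Int) ^ (B * sh.length + j) := by
  unfold pvHNDAlt
  rw [PySem.List.enumerate_eq_map_pyRange sh 0]
  simp only [show PySem.List.len sh = ((sh.length : Nat) : Int) from by
               simp [PySem.List.len],
             PySem.List.pyRange_zero_natCast, List.foldl_map, Int.toNat_natCast,
             pv_toNat_pos, pv_band_sr_one, Int.shiftLeft_eq,
             PySem.List.foldl_add, pv_list_sum]
  rw [zero_add]

lemma pv_foldl_const {α : Type} (l : List α) (c : Int) :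
    List.foldl (fun code _ => code) c l = c := by
  induction l generalizing c with
  | nil => rfl
  | cons a l ih => simpa using ih c

lemma pv_nd_eq (sh : List Int) (order : Int) :
    pvHND sh (sh.length : Int) order = pvHNDAlt sh (sh.length : Int) order := by
  by_cases h : order ≤ 0
  · have hempty : PySem.List.pyRange 0 order = [] := by
      simp [PySem.List.pyRange]; omega
    unfold pvHND pvHNDAlt
    rw [hempty]
    simp only [List.foldl_nil]
    rw [pv_foldl_const]
  · rw [show order = ((order.toNat : Nat) : Int) from (Int.toNat_of_nonneg (by omega)).symm,
        pv_nd_A, pv_nd_B]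
    conv_rhs => rw [Finset.sum_comm]
    apply Finset.sum_congr rfl
    intro B _
    apply Finset.sum_congr rfl
    intro j _
    rcases pvBit01 (PySem.Int.bxor (PySem.List.pyGetD sh (j:Int) 0)
      ((PySem.List.pyGetD sh (j:Int) 0) >>> (1:Nat))) B with hb | hb <;> rw [hb] <;> norm_num


-- ===== VERDICT (by name: the statement is the Claim_ definition above) =====
theorem hilbert_encode_spec : Claim_equal_hilbert_encode := by
  intro coords order _ _
  unfold Spec_hilbert_encode hilbert_encode hilbert_encode_alt
  simp only []
  split
  · rfl
  · split
    · rfl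
    · split
      · exact pv_h2_eq _ _ _
      · simpa [List.length_map] using
          pv_nd_eq (coords.map (fun c => if c < 0 then c + ((1:Int) <<< order.toNat) else c)) order
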